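-- pv_equiv track=rewrite | github.com/dretyr/adventofai | 2023/5/Code_failed/main_part2_try15.py | binary_search_convert
-- ===== SOURCE A (Python) =====
-- def binary_search_convert(number, processed_ranges):
--     left, right = 0, len(processed_ranges) - 1
--     while left <= right:
--         mid = left + (right - left) // 2
--         src_start, src_end, dest_start = processed_ranges[mid]
--         if src_start <= number < src_end:
--             return number - src_start + dest_start
--         elif number < src_start:
--             right = mid - 1
--         else:
--             left = mid + 1
--     return number  # Return the number itself if no mapping is found
-- ===== SOURCE B (Python) =====
-- def binary_search_convert(number, processed_ranges):
--     # Recursive divide-and-conquer: split the list at the pivot into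
--     # (lo, pivot, hi) by slicing; no index bookkeeping at all.
--     def go(sub):
--         if not sub:
--             return number
--         mid = (len(sub) - 1) // 2
--         lo, rest = sub[:mid], sub[mid:]
--         src_start, src_end, dest_start = rest[0]
--         if src_start <= number < src_end:
--             return number - src_start + dest_start
--         return go(lo) if number < src_start else go(rest[1:])
--     return go(processed_ranges)
-- ===== Notes on version B (the rewrite author's own statement) =====
-- stated objective: alternative
-- what changed: The iterative while-loop over (left, right) index bounds with repeated indexing is replaced by a recursive divide-and-conquer helper that splits the list at the pivot into slices (lo, pivot, hi) and recurses on a slice, visiting the same pivots in the same order.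
import Mathlib
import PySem

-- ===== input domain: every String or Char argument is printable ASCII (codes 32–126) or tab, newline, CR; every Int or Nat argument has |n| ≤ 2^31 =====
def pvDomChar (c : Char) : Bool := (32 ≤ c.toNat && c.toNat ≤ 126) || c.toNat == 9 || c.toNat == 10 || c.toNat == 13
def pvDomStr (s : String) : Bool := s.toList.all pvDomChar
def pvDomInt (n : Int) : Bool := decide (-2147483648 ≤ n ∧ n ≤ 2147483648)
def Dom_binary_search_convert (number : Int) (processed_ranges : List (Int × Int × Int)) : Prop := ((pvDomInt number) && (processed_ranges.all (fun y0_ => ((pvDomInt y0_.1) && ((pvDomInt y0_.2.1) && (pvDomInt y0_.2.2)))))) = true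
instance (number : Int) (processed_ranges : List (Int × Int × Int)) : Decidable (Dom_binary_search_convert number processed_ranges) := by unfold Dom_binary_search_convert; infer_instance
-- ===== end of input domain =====

-- B replaces A's iterative (left, right)-index binary-search loop by a recursive
-- divide-and-conquer helper splitting the list into slices at the pivot;
-- same return value on every input.
-- ===== PORT A =====
-- A's while-loop over (left, right) bounds, transliterated as recursion on the bounds;
-- the Nat fuel only makes the recursion structural (fuel = length + 1 is never exhausted).
def pvLoopA (number : Int) (pr : List (Int × Int × Int)) : Nat → Int → Int → Int
  | 0, _, _ => number
  | fuel + 1, left, right =>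
    if left ≤ right then
      let mid := left + PySem.Int.floordiv (right - left) 2
      match PySem.List.pyGet? pr mid with
      | none => 0  -- unreachable (IndexError); the loop invariant keeps mid in range
      | some (src_start, src_end, dest_start) =>
        if src_start ≤ number ∧ number < src_end then number - src_start + dest_start
        else if number < src_start then pvLoopA number pr fuel left (mid - 1)
        else pvLoopA number pr fuel (mid + 1) right
    else number

def binary_search_convert (number : Int) (processed_ranges : List (Int × Int × Int)) : Int :=
  pvLoopA number processed_ranges (processed_ranges.length + 1) 0 (processed_ranges.length - 1)

-- ===== PORT B =====
-- recursive divide-and-conquer on slices: sub[:mid] = take mid, sub[mid:] = drop mid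
-- (nonnegative bounds); terminates because both recursive slices are shorter.
def pvGoB (number : Int) : List (Int × Int × Int) → Int
  | [] => number
  | x :: xs =>
    let mid : Nat := ((x :: xs).length - 1) / 2
    let rest := (x :: xs).drop mid
    match rest with
    | [] => number  -- unreachable: rest[0] exists since mid < length
    | (src_start, src_end, dest_start) :: _ =>
      if src_start ≤ number ∧ number < src_end then number - src_start + dest_start
      else if number < src_start then pvGoB number ((x :: xs).take mid)
      else pvGoB number (rest.drop 1)
  termination_by sub => sub.length
  decreasing_by
  · simp only [List.length_take, List.length_cons]; omega
  · simp only [List.length_drop, List.length_cons]; omega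

def binary_search_convert_alt (number : Int) (processed_ranges : List (Int × Int × Int)) : Int :=
  pvGoB number processed_ranges

-- ===== PRECONDITION & SPEC =====
def Spec_binary_search_convert (number : Int) (processed_ranges : List (Int × Int × Int)) (out : Int) : Prop := out = binary_search_convert_alt number processed_ranges
instance (number : Int) (processed_ranges : List (Int × Int × Int)) (out : Int) : Decidable (Spec_binary_search_convert number processed_ranges out) := by unfold Spec_binary_search_convert; infer_instance

-- ===== CLAIM (what is proved, stated in full; the proofs are below) =====
def Claim_equal_binary_search_convert : Prop := ∀ (number : Int) (processed_ranges : List (Int × Int × Int)), Dom_binary_search_convert number processed_ranges → Spec_binary_search_convert number processed_ranges (binary_search_convert number processed_ranges)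

-- ===== LEMMAS AND PROOFS =====

-- one-step unfolding of pvGoB on a nonempty list
lemma pvGoB_cons (number : Int) (x : Int × Int × Int) (xs : List (Int × Int × Int)) :
    pvGoB number (x :: xs) =
      match (x :: xs).drop (((x :: xs).length - 1) / 2) with
      | [] => number
      | (s, e, d) :: _ =>
        if s ≤ number ∧ number < e then number - s + d
        else if number < s then pvGoB number ((x :: xs).take (((x :: xs).length - 1) / 2))
        else pvGoB number (((x :: xs).drop (((x :: xs).length - 1) / 2)).drop 1) := by
  rw [pvGoB]

-- Loop invariant: with enough fuel, the iterative search on bounds [left, right]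
-- equals the divide-and-conquer search on the contiguous sublist pr[left .. right].
lemma pvLoop_eq_go (number : Int) (pr : List (Int × Int × Int)) :
    ∀ fuel k (left right : Int), k ≤ fuel → (right + 1 - left).toNat = k → 0 ≤ left →
      right < pr.length →
      pvLoopA number pr fuel left right = pvGoB number ((pr.drop left.toNat).take k) := by
  intro fuel
  induction fuel with
  | zero =>
    intro k left right hkf hk hl hr
    have hk0 : k = 0 := by omega
    simp [pvLoopA, pvGoB, hk0]
  | succ fuel ih =>
    intro k left right hkf hk hl hr
    by_cases hlr : left ≤ right
    · have hk1 : 1 ≤ k := by omega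
      have hfd : PySem.Int.floordiv (right - left) 2 = (right - left) / 2 :=
        PySem.Int.floordiv_eq_ediv_of_pos (by omega)
      have hsublen : ((pr.drop left.toNat).take k).length = k := by
        simp only [List.length_take, List.length_drop]; omega
      set mN : Nat := (k - 1) / 2 with hmN
      have hmNk : mN < k := by omega
      have hidx : left.toNat + mN < pr.length := by omega
      have hmid : left + (right - left) / 2 = ((left.toNat + mN : Nat) : Int) := by omega
      have hgetA : PySem.List.pyGet? pr (left + (right - left) / 2) =
          some pr[left.toNat + mN] := by
        rw [hmid, PySem.List.pyGet?_natCast, List.getElem?_eq_getElem hidx]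
      obtain ⟨x, xs, hx⟩ := List.exists_cons_of_ne_nil
        (show (pr.drop left.toNat).take k ≠ [] by
          intro h; rw [h] at hsublen; simp at hsublen; omega)
      have hmid2 : ((x :: xs).length - 1) / 2 = mN := by rw [← hx, hsublen]
      have hdrop : ((pr.drop left.toNat).take k).drop mN =
          pr[left.toNat + mN] :: ((pr.drop left.toNat).take k).drop (mN + 1) := by
        rw [List.drop_eq_getElem_cons (by omega : mN < ((pr.drop left.toNat).take k).length)]
        congr 1
        rw [List.getElem_take, List.getElem_drop]
      rcases hElem : pr[left.toNat + mN] with ⟨s0, e0, d0⟩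
      rw [hx, pvGoB_cons, hmid2, ← hx, hdrop, hElem]
      simp only [pvLoopA, hlr, if_pos, hfd, hgetA, hElem, List.drop_succ_cons, List.drop_zero]
      split_ifs with h1 h2
      · rfl
      · -- go left: bounds [left, mid-1] ↔ slice take mN
        have := ih mN left (left + (right - left) / 2 - 1) (by omega) (by omega) hl (by omega)
        rw [this, List.take_take, min_eq_left (by omega : mN ≤ k)]
      · -- go right: bounds [mid+1, right] ↔ slice drop (mN+1)
        have e1 : (left + (right - left) / 2 + 1).toNat = left.toNat + (mN + 1) := by omega
        have e2 : k - (mN + 1) = k - 1 - mN := by omega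
        have := ih (k - (mN + 1)) (left + (right - left) / 2 + 1) right
          (by omega) (by omega) (by omega) hr
        rw [this, e1, e2, List.drop_take, List.drop_drop, e2]
    · have hk0 : k = 0 := by omega
      simp [pvLoopA, pvGoB, hlr, hk0]

-- ===== VERDICT (by name: the statement is the Claim_ definition above) =====
theorem binary_search_convert_spec : Claim_equal_binary_search_convert := by
  intro number pr _
  unfold Spec_binary_search_convert binary_search_convert binary_search_convert_alt
  have h := pvLoop_eq_go number pr (pr.length + 1) pr.length 0 (pr.length - 1)
    (by omega) (by omega) (by omega) (by omega)
  simpa using h
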